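-- pv_equiv track=rewrite | github.com/multiful/Travel-QA | src/scoring/cluster_dispersion.py | _count_label_backtracks
-- ===== SOURCE A (Python) =====
-- def _count_label_backtracks(labels: list[int]) -> int:
--     """클러스터 레이블 리스트에서 비연속 재진입 횟수 계산 (M4 공용)."""
--     seen: set[int] = set()
--     prev: int | None = None
--     count = 0
--     for lbl in labels:
--         if lbl in seen and lbl != prev:
--             count += 1
--         seen.add(lbl)
--         prev = lbl
--     return count
-- ===== SOURCE B (Python) =====
-- def _count_label_backtracks(labels: list[int]) -> int:
--     """Runs-minus-distinct: each distinct label's first run is free; every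
--     further run of that label is one non-consecutive re-entry."""
--     if not labels:
--         return 0
--     runs = 1 + sum(1 for a, b in zip(labels, labels[1:]) if a != b)
--     return runs - len(set(labels))
-- ===== Notes on version B (the rewrite author's own statement) =====
-- stated objective: alternative
-- what changed: Replaces A's seen-set/prev-pointer scan with the closed-form identity backtracks = (number of maximal runs, counted from adjacent unequal pairs) - (number of distinct labels); the membership test inside the loop disappears.
import Mathlib
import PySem

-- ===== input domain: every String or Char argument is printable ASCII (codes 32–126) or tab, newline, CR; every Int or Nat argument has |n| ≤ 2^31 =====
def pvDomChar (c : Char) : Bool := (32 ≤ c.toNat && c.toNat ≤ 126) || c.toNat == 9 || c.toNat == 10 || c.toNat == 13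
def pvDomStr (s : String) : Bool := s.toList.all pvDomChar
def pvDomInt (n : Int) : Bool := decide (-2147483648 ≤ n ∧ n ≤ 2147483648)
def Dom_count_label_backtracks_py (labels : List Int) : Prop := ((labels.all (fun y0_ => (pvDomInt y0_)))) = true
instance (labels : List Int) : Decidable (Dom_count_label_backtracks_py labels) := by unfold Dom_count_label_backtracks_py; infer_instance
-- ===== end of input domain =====

-- B computes backtracks as (number of maximal runs) − (number of distinct labels);
-- A's per-element seen-set membership test disappears. Same value on every input.

-- ===== PORT A =====
-- seen-set / prev-pointer / counter scan, transliterated from Source A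
def count_label_backtracks_py (labels : List Int) : Int :=
  (labels.foldl
    (fun (st : PySem.Set Int × Option Int × Int) lbl =>
      let count := if st.1.contains lbl && (some lbl != st.2.1) then st.2.2 + 1 else st.2.2
      (PySem.Set.add st.1 lbl, some lbl, count))
    (PySem.Set.empty, none, 0)).2.2

-- ===== PORT B =====
def count_label_backtracks_py_alt (labels : List Int) : Int :=
  match labels with
  | [] => 0
  | _ =>
    let runs : Int :=
      1 + ((labels.zip (labels.drop 1)).foldl
             (fun acc p => if p.1 ≠ p.2 then acc + 1 else acc) (0 : Int))
    runs - ((PySem.Set.ofList labels).length : Int)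

-- ===== PRECONDITION & SPEC =====
def Spec_count_label_backtracks_py (labels : List Int) (out : Int) : Prop := out = count_label_backtracks_py_alt labels
instance (labels : List Int) (out : Int) : Decidable (Spec_count_label_backtracks_py labels out) := by unfold Spec_count_label_backtracks_py; infer_instance

-- ===== CLAIM (what is proved, stated in full; the proofs are below) =====
def Claim_equal_count_label_backtracks_py : Prop := ∀ (labels : List Int), Dom_count_label_backtracks_py labels → Spec_count_label_backtracks_py labels (count_label_backtracks_py labels)

-- ===== LEMMAS AND PROOFS =====

-- A's loop body, as structural recursion with the count factored out
def gRec (seen : PySem.Set Int) (prev : Option Int) : List Int → Int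
  | [] => 0
  | x :: xs =>
      (if seen.contains x && (some x != prev) then (1 : Int) else 0)
      + gRec (PySem.Set.add seen x) (some x) xs

-- number of adjacent changes in p :: l
def chg (p : Int) : List Int → Int
  | [] => 0
  | x :: xs => (if x ≠ p then (1 : Int) else 0) + chg x xs

-- number of elements of l not already in seen (counted once each)
def newd (seen : PySem.Set Int) : List Int → Int
  | [] => 0
  | x :: xs => (if seen.contains x then (0 : Int) else 1) + newd (PySem.Set.add seen x) xs

theorem foldA_eq_gRec (l : List Int) : ∀ (seen : PySem.Set Int) (prev : Option Int) (c : Int),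
    (l.foldl
      (fun (st : PySem.Set Int × Option Int × Int) lbl =>
        let count := if st.1.contains lbl && (some lbl != st.2.1) then st.2.2 + 1 else st.2.2
        (PySem.Set.add st.1 lbl, some lbl, count))
      (seen, prev, c)).2.2 = c + gRec seen prev l := by
  induction l with
  | nil => intro seen prev c; simp [gRec]
  | cons x xs ih =>
      intro seen prev c
      simp only [List.foldl, gRec, ih]
      split_ifs <;> ring

theorem zipfold (xs : List Int) : ∀ (x : Int) (acc : Int),
    (List.zipWith Prod.mk (x :: xs) xs).foldl
        (fun acc p => if p.1 ≠ p.2 then acc + 1 else acc) acc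
      = acc + chg x xs := by
  induction xs with
  | nil => intro x acc; simp [chg]
  | cons y ys ih =>
      intro x acc
      simp only [List.zipWith, List.foldl, chg, ih]
      split_ifs <;> omega

theorem len_foldl_add (l : List Int) : ∀ (seen : PySem.Set Int),
    ((l.foldl PySem.Set.add seen).length : Int) = seen.length + newd seen l := by
  induction l with
  | nil => intro seen; simp [newd]
  | cons x xs ih =>
      intro seen
      simp only [List.foldl, newd, ih]
      by_cases h : x ∈ seen <;> simp [PySem.Set.add, h] <;> omega

theorem mem_add_self (seen : PySem.Set Int) (x : Int) :
    x ∈ PySem.Set.add seen x := by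
  simp [PySem.Set.add]
  split_ifs with h <;> simp_all

theorem gRec_eq (l : List Int) : ∀ (seen : PySem.Set Int) (p : Int),
    p ∈ seen → gRec seen (some p) l = chg p l - newd seen l := by
  induction l with
  | nil => intro seen p _; simp [gRec, chg, newd]
  | cons x xs ih =>
      intro seen p hp
      have hx := mem_add_self seen x
      simp only [gRec, chg, newd, ih (PySem.Set.add seen x) x hx]
      by_cases hc : x ∈ seen
      · by_cases hxp : x = p
        · subst hxp; simp [hc]
        · simp [hc, hxp] <;> omega
      · have hxp : x ≠ p := fun h => hc (h ▸ hp)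
        simp [hc, hxp]

-- ===== VERDICT (by name: the statement is the Claim_ definition above) =====
theorem count_label_backtracks_py_spec : Claim_equal_count_label_backtracks_py := by
  intro labels _
  unfold Spec_count_label_backtracks_py count_label_backtracks_py count_label_backtracks_py_alt
  cases labels with
  | nil => simp [PySem.Set.empty]
  | cons x xs =>
      rw [foldA_eq_gRec]
      have hadd : PySem.Set.add PySem.Set.empty x = [x] := by
        simp [PySem.Set.add, PySem.Set.empty]
      have h1 : gRec PySem.Set.empty none (x :: xs) = gRec [x] (some x) xs := by
        simp [gRec, PySem.Set.empty, PySem.Set.contains]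
      rw [h1, gRec_eq xs [x] x (by simp)]
      have h2 : PySem.Set.ofList (x :: xs) = xs.foldl PySem.Set.add [x] := by
        rw [PySem.Set.ofList_eq_foldl]
        simp [List.foldl]
      simp only [List.zip, List.drop_one, List.tail_cons, zipfold, h2, len_foldl_add]
      simp
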